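-- pv_equiv track=rewrite | github.com/Whatapalaver/aoc_21 | aoc/day10/solution.py | result_part1
-- ===== SOURCE A (Python) =====
-- def parse(input):
--     return [[char for char in row] for row in input]
--
-- def corrupt_closer(open_and_shut, row):
--     """Returns boolean indicating corruptness and first corrupt closer"""
--     openers = open_and_shut.keys()
--     closers = open_and_shut.values()
--
--     openers_stack = []
--
--     for char in row:
--         if char in openers:
--             openers_stack.append(char)
--         elif char in closers:
--             if not openers_stack:
--                 return True, char
--             else:
--                 last_unclosed_opener = openers_stack.pop()
--                 if not open_and_shut[last_unclosed_opener] == char: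
--                     return True, char
--     return False, None
--
-- def score_invalid_closers(invalid_closers):
--     points = {")": 3, "]": 57, "}": 1197, ">": 25137}
--
--     return sum([points[closer] for closer in invalid_closers])
--
-- def result_part1(input):
--     data = parse(input)
--     open_and_shut = {"(": ")", "[": "]", "{": "}", "<": ">"}
--     invalid_closers = []
--     for row in data:
--         corrupt, char = corrupt_closer(open_and_shut, row)
--         if corrupt:
--             invalid_closers.append(char)
--     return score_invalid_closers(invalid_closers)
-- ===== SOURCE B (Python) =====
-- BRACKETS = "()[]{}<>"
-- PAIRS = ("()", "[]", "{}", "<>")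
-- POINTS = {")": 3, "]": 57, "}": 1197, ">": 25137}
--
-- def result_part1(input):
--     total = 0
--     for row in input:
--         s = "".join(ch for ch in row if ch in BRACKETS)
--         while True:
--             t = s
--             for p in PAIRS:
--                 t = t.replace(p, "")
--             if t == s:
--                 break
--             s = t
--         for ch in s:
--             if ch in POINTS:
--                 total += POINTS[ch]
--                 break
--     return total
-- ===== Notes on version B (the rewrite author's own statement) =====
-- stated objective: alternative
-- what changed: Replaces the per-line opener-stack scan with a fixpoint loop that repeatedly deletes '()','[]','{}','<>' pairs via str.replace until the line is irreducible, then scores the first closing bracket left over.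
import Mathlib
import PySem

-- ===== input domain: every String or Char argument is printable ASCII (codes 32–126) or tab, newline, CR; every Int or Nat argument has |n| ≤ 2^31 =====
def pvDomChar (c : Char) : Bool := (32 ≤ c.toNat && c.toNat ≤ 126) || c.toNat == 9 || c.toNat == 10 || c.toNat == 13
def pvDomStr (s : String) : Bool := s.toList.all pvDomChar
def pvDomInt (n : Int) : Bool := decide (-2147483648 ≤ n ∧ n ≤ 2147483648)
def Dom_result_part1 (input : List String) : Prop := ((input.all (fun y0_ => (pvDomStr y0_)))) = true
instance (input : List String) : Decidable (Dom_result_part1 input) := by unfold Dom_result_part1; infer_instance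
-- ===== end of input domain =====

-- B replaces the per-line stack scan with a fixpoint of global "()"/"[]"/"{}"/"<>" pair elimination,
-- then scores the first closing bracket left over; objective: alternative (equivalent result, different algorithm).


-- ===== PORT A =====
-- open_and_shut = {"(": ")", "[": "]", "{": "}", "<": ">"}
def oasA : PySem.Dict Char Char :=
  ((((PySem.Dict.empty).insert '(' ')').insert '[' ']').insert '{' '}').insert '<' '>'

-- points = {")": 3, "]": 57, "}": 1197, ">": 25137}
def pointsA : PySem.Dict Char Int :=
  ((((PySem.Dict.empty).insert ')' 3).insert ']' 57).insert '}' 1197).insert '>' 25137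

-- the loop of corrupt_closer; the Lean list head is the Python stack's top (append/pop at the end)
def ccGo (d : PySem.Dict Char Char) (stack : List Char) : List Char → Bool × Option Char
  | [] => (false, none)
  | c :: t =>
    if d.keys.contains c then ccGo d (c :: stack) t
    else if d.values.contains c then
      match stack with
      | [] => (true, some c)
      | o :: rest =>
        -- open_and_shut[last_unclosed_opener]: o is always a key of d, so the getD default is never read
        if d.getD o ' ' == c then ccGo d rest t else (true, some c)
    else ccGo d stack t

def corruptCloser (d : PySem.Dict Char Char) (row : List Char) : Bool × Option Char :=
  ccGo d [] row

-- points[closer]: closer is always a key of points, so the getD default is never read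
def scoreInvalidClosers (invalid : List Char) : Int :=
  (invalid.map (fun closer => pointsA.getD closer 0)).sum

def result_part1 (input : List String) : Int :=
  let data := input.map (fun row => row.toList)   -- parse
  let invalid := data.foldl (fun acc row =>
    match corruptCloser oasA row with
    | (true, some c) => acc ++ [c]
    | _ => acc) []
  scoreInvalidClosers invalid

-- ===== PORT B =====
-- BRACKETS = "()[]{}<>"
def bracketsB : List Char := ['(', ')', '[', ']', '{', '}', '<', '>']

-- POINTS = {")": 3, "]": 57, "}": 1197, ">": 25137}
def pointsB : PySem.Dict Char Int :=
  ((((PySem.Dict.empty).insert ')' 3).insert ']' 57).insert '}' 1197).insert '>' 25137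

-- Proof-level characterisation of s.replace(ab, "") for a two-char pattern; used only to justify
-- reduceFix's termination (the port itself calls PySem.Chars.replace, the exact str.replace).
def rem (a b : Char) : List Char → List Char
  | [] => []
  | [c] => [c]
  | c :: d :: t => if c = a ∧ d = b then rem a b t else c :: rem a b (d :: t)

theorem rem_sublist (a b : Char) : ∀ l : List Char, (rem a b l).Sublist l
  | [] => by simp [rem]
  | [c] => by simp [rem]
  | c :: d :: t => by
    rw [rem]
    split
    · exact (rem_sublist a b t).trans ((List.sublist_cons_self _ _).trans (List.sublist_cons_self _ _))
    · exact (rem_sublist a b (d :: t)).cons₂ c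

theorem replace_go_eq (a b : Char) : ∀ (fuel : Nat) (l acc : List Char), l.length ≤ fuel →
    PySem.Chars.replace.go [a, b] [] fuel l acc = acc.reverse ++ rem a b l := by
  intro fuel
  induction fuel with
  | zero =>
    intro l acc h
    have : l = [] := List.eq_nil_of_length_eq_zero (Nat.le_zero.mp h)
    subst this
    simp [PySem.Chars.replace.go, rem]
  | succ n ih =>
    intro l acc h
    match l with
    | [] => simp [PySem.Chars.replace.go, rem]
    | [c] =>
      have hp : [a, b].isPrefixOf [c] = false := by
        simp [List.isPrefixOf]
      simp [PySem.Chars.replace.go, hp, rem]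
      exact (ih [] (c :: acc) (by simp)).trans (by simp [rem])
    | c :: d :: t =>
      by_cases hm : c = a ∧ d = b
      · have hp : [a, b].isPrefixOf (c :: d :: t) = true := by
          simp [List.isPrefixOf, hm.1, hm.2]
        rw [show (n + 1 : Nat) = n.succ from rfl]
        simp only [PySem.Chars.replace.go, hp]
        rw [show rem a b (c :: d :: t) = rem a b t by rw [rem, if_pos hm]]
        exact (ih t acc (by simp at h; omega)).trans (by simp)
      · have hp : [a, b].isPrefixOf (c :: d :: t) = false := by
          by_contra hcon
          simp only [Bool.not_eq_false, List.isPrefixOf, Bool.and_eq_true, beq_iff_eq] at hcon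
          exact hm ⟨hcon.1.symm, (by simpa [List.isPrefixOf] using hcon.2 : b = d).symm⟩
        rw [show (n + 1 : Nat) = n.succ from rfl]
        simp only [PySem.Chars.replace.go, hp]
        rw [show rem a b (c :: d :: t) = c :: rem a b (d :: t) by rw [rem, if_neg hm]]
        rw [ih (d :: t) (c :: acc) (by simp at h ⊢; omega)]
        simp

theorem replace_eq_rem (a b : Char) (l : List Char) :
    PySem.Chars.replace l [a, b] [] = rem a b l := by
  rw [PySem.Chars.replace]
  simp only [List.isEmpty_cons]
  exact replace_go_eq a b l.length l [] le_rfl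

-- while True: t = s; for p in PAIRS: t = t.replace(p, ""); if t == s: break; s = t
def reduceFix (s : List Char) : List Char :=
  let t := PySem.Chars.replace (PySem.Chars.replace (PySem.Chars.replace
            (PySem.Chars.replace s ['(', ')'] []) ['[', ']'] []) ['{', '}'] []) ['<', '>'] []
  if t = s then s else reduceFix t
termination_by s.length
decreasing_by
  rename_i h
  simp only [t, replace_eq_rem] at h ⊢
  have h1 := (rem_sublist '(' ')' s).length_le
  have h2 := (rem_sublist '[' ']' (rem '(' ')' s)).length_le
  have h3 := (rem_sublist '{' '}' (rem '[' ']' (rem '(' ')' s))).length_le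
  have h4 := (rem_sublist '<' '>' (rem '{' '}' (rem '[' ']' (rem '(' ')' s)))).length_le
  by_contra hnot
  have q1 : rem '(' ')' s = s := (rem_sublist _ _ _).eq_of_length (by omega)
  rw [q1] at h2 h3 h4 hnot h
  have q2 : rem '[' ']' s = s := (rem_sublist _ _ _).eq_of_length (by omega)
  rw [q2] at h3 h4 hnot h
  have q3 : rem '{' '}' s = s := (rem_sublist _ _ _).eq_of_length (by omega)
  rw [q3] at h4 hnot h
  exact h ((rem_sublist _ _ _).eq_of_length (by omega))

def result_part1_alt (input : List String) : Int :=
  input.foldl (fun total row =>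
    let s := row.toList.filter (fun ch => PySem.Chars.isIn [ch] bracketsB)
    let r := reduceFix s
    -- for ch in s: if ch in POINTS: total += POINTS[ch]; break
    match r.find? (fun ch => pointsB.contains ch) with
    | some ch => total + pointsB.getD ch 0   -- ch is always a key of POINTS here
    | none => total) 0

-- ===== PRECONDITION & SPEC =====
def Spec_result_part1 (input : List String) (out : Int) : Prop := out = result_part1_alt input
instance (input : List String) (out : Int) : Decidable (Spec_result_part1 input out) := by unfold Spec_result_part1; infer_instance

-- ===== CLAIM (what is proved, stated in full; the proofs are below) =====
def Claim_equal_result_part1 : Prop := ∀ (input : List String), Dom_result_part1 input → Spec_result_part1 input (result_part1 input)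

-- ===== LEMMAS AND PROOFS =====

def pats : List (Char × Char) := [('(', ')'), ('[', ']'), ('{', '}'), ('<', '>')]

theorem isIn_singleton (c : Char) (l : List Char) : PySem.Chars.isIn [c] l = l.contains c := by
  by_cases h : c ∈ l
  · obtain ⟨s, t, rfl⟩ := List.mem_iff_append.mp h
    rw [show (s ++ c :: t).contains c = true by simp]
    exact (PySem.Chars.isIn_iff_infix _ _).mpr ⟨s, t, by simp⟩
  · rw [show l.contains c = false by simpa using h]
    by_contra hcon
    rw [Bool.not_eq_false] at hcon
    exact h (List.singleton_sublist.mp ((PySem.Chars.isIn_iff_infix _ _).mp hcon).sublist)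

theorem oasA_keys : oasA.keys = ['(', '[', '{', '<'] := rfl

theorem oasA_values : oasA.values = [')', ']', '}', '>'] := rfl

theorem pointsB_contains (c : Char) : pointsB.contains c = [')', ']', '}', '>'].contains c := by
  simp only [pointsB, PySem.Dict.contains_insert, PySem.Dict.contains_empty]
  by_cases h1 : c = ')' <;> by_cases h2 : c = ']' <;> by_cases h3 : c = '}' <;> by_cases h4 : c = '>' <;> simp [h1, h2, h3, h4]

theorem opener_not_points {c : Char} (h : oasA.keys.contains c = true) : pointsB.contains c = false := by
  rw [oasA_keys] at h
  rw [pointsB_contains]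
  simp at h ⊢
  rcases h with rfl | rfl | rfl | rfl <;> decide

theorem closer_of_bracket {c : Char} (hb : c ∈ bracketsB) (h : oasA.keys.contains c = false) :
    c ∈ [')', ']', '}', '>'] := by
  rw [oasA_keys] at h
  simp [bracketsB] at hb ⊢
  simp at h
  tauto

theorem ccGo_congr (c : Char) {l1 l2 : List Char} (h : ∀ st, ccGo oasA st l1 = ccGo oasA st l2)
    (st : List Char) : ccGo oasA st (c :: l1) = ccGo oasA st (c :: l2) := by
  simp only [ccGo]
  split_ifs with h1 h2
  · exact h _
  · cases st with
    | nil => rfl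
    | cons o rest =>
      by_cases hm : (oasA.getD o ' ' == c) = true
      · simp only [hm, if_pos]
        exact h rest
      · simp only [Bool.not_eq_true] at hm
        simp only [hm]
        rfl
  · exact h st

theorem ccGo_filter : ∀ (l st : List Char),
    ccGo oasA st (l.filter (fun ch => PySem.Chars.isIn [ch] bracketsB)) = ccGo oasA st l
  | [], _ => rfl
  | c :: t, st => by
    rw [List.filter_cons]
    by_cases hb : (PySem.Chars.isIn [c] bracketsB) = true
    · rw [if_pos (by simpa using hb)]
      exact ccGo_congr c (fun st' => ccGo_filter t st') st
    · rw [if_neg (by simpa using hb)]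
      have hmem : c ∉ bracketsB := by
        rw [isIn_singleton] at hb
        simpa using hb
      have hk : oasA.keys.contains c = false := by
        rw [oasA_keys]
        simp [bracketsB] at hmem ⊢
        tauto
      have hv : oasA.values.contains c = false := by
        rw [oasA_values]
        simp [bracketsB] at hmem ⊢
        tauto
      rw [show ccGo oasA st (c :: t) = ccGo oasA st t by simp only [ccGo, hk, hv]; rfl]
      exact ccGo_filter t st

theorem ccGo_rem : ∀ (a b : Char), (a, b) ∈ pats → ∀ (l st : List Char),
    ccGo oasA st (rem a b l) = ccGo oasA st l
  | a, b, h, [], _ => rfl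
  | a, b, h, [c], _ => by rw [rem]
  | a, b, h, c :: d :: t, st => by
    rw [rem]
    by_cases hm : c = a ∧ d = b
    · rw [if_pos hm]
      obtain ⟨rfl, rfl⟩ := hm
      have step : ∀ st', ccGo oasA st' (c :: d :: t) = ccGo oasA st' t := by
        intro st'
        simp only [pats, List.mem_cons, Prod.mk.injEq, List.not_mem_nil, or_false] at h
        rcases h with ⟨rfl, rfl⟩ | ⟨rfl, rfl⟩ | ⟨rfl, rfl⟩ | ⟨rfl, rfl⟩ <;> rfl
      rw [ccGo_rem c d h t st, ← step st]
    · rw [if_neg hm]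
      exact ccGo_congr c (fun st' => ccGo_rem a b h (d :: t) st') st

theorem ccGo_openers : ∀ (P rest st : List Char), (∀ c ∈ P, oasA.keys.contains c = true) →
    ccGo oasA st (P ++ rest) = ccGo oasA (P.reverse ++ st) rest
  | [], rest, st, _ => by simp
  | c :: P, rest, st, h => by
    have hc : oasA.keys.contains c = true := h c (by simp)
    rw [List.cons_append, show ccGo oasA st (c :: (P ++ rest)) = ccGo oasA (c :: st) (P ++ rest) by
      simp only [ccGo, hc]; rfl]
    rw [ccGo_openers P rest (c :: st) (fun x hx => h x (by simp [hx]))]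
    simp

theorem scan_irred (l : List Char) (hall : ∀ c ∈ l, c ∈ bracketsB)
    (hirr : ∀ p ∈ pats, ¬ ([p.1, p.2] <:+: l)) :
    ccGo oasA [] l = (match l.find? (fun ch => pointsB.contains ch) with
      | some ch => (true, some ch)
      | none => (false, none)) := by
  have hPR : l.takeWhile (fun c => oasA.keys.contains c) ++ l.dropWhile (fun c => oasA.keys.contains c) = l :=
    List.takeWhile_append_dropWhile
  have hP : ∀ c ∈ l.takeWhile (fun c => oasA.keys.contains c), oasA.keys.contains c = true :=
    fun c hc => List.mem_takeWhile_imp hc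
  have hPnp : ∀ c ∈ l.takeWhile (fun c => oasA.keys.contains c), ¬ (pointsB.contains c = true) := by
    intro c hc
    rw [opener_not_points (hP c hc)]
    simp
  cases hR : l.dropWhile (fun c => oasA.keys.contains c) with
  | nil =>
    have hfind : l.find? (fun ch => pointsB.contains ch) = none := by
      rw [List.find?_eq_none]
      intro x hx
      rw [← hPR, hR, List.append_nil] at hx
      exact hPnp x hx
    rw [hfind, ← hPR, hR, List.append_nil]
    have h0 := ccGo_openers (l.takeWhile (fun c => oasA.keys.contains c)) [] [] hP
    simp only [List.append_nil] at h0
    rw [h0]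
    rfl
  | cons c t =>
    have hcl : oasA.keys.contains c = false := by
      have := List.head?_dropWhile_not (fun c => oasA.keys.contains c) l
      rw [hR] at this
      simpa using this
    have hcb : c ∈ bracketsB := hall c (by rw [← hPR, hR]; simp)
    have hc4 : c ∈ [')', ']', '}', '>'] := closer_of_bracket hcb hcl
    have hcp : pointsB.contains c = true := by
      rw [pointsB_contains]
      simpa using hc4
    have hfind : l.find? (fun ch => pointsB.contains ch) = some c := by
      rw [← hPR, hR, List.find?_append]
      rw [List.find?_eq_none.mpr hPnp]
      simp [List.find?_cons_of_pos, hcp]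
    rw [hfind, ← hPR, hR]
    rw [ccGo_openers _ _ [] hP, List.append_nil]
    have hcv : oasA.values.contains c = true := by
      rw [oasA_values]
      simpa using hc4
    cases hrev : (l.takeWhile (fun c => oasA.keys.contains c)).reverse with
    | nil => simp only [ccGo, hcl, hcv]; rfl
    | cons o rest =>
      have ho : oasA.keys.contains o = true := by
        apply hP
        rw [← List.mem_reverse, hrev]
        simp
      have hnm : (oasA.getD o ' ' == c) = false := by
        by_contra hcon
        rw [Bool.not_eq_false, beq_iff_eq] at hcon
        have hpair : (o, c) ∈ pats := by
          rw [oasA_keys] at ho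
          simp at ho
          rcases ho with rfl | rfl | rfl | rfl <;> subst hcon <;> decide
        apply hirr (o, c) hpair
        refine ⟨rest.reverse, t, ?_⟩
        have : l.takeWhile (fun c => oasA.keys.contains c) = rest.reverse ++ [o] := by
          rw [← List.reverse_reverse (l.takeWhile _), hrev]
          simp
        rw [← hPR, hR, this]
        simp
      simp only [ccGo, hcl, hcv, hnm]
      rfl

theorem not_infix_of_rem_eq : ∀ {a b : Char} {l : List Char}, rem a b l = l → ¬ ([a, b] <:+: l)
  | a, b, [], _, h => by simp at h
  | a, b, [c], _, h => by
    have := h.sublist.length_le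
    simp at this
  | a, b, c :: d :: t, heq, hinf => by
    rw [rem] at heq
    by_cases hm : c = a ∧ d = b
    · rw [if_pos hm] at heq
      have h1 := (rem_sublist a b t).length_le
      have h2 : (rem a b t).length = t.length + 2 := by rw [heq]; simp
      omega
    · rw [if_neg hm] at heq
      have heq' : rem a b (d :: t) = d :: t := by
        injection heq
      rcases List.infix_cons_iff.mp hinf with hpre | hinf'
      · rcases List.prefix_cons_iff.mp hpre with h0 | ⟨t', ht', hpre'⟩
        · simp at h0
        · have hac : a = c := by injection ht'
          have hbd : [b] = t' := by injection ht'
          subst hbd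
          rcases List.prefix_cons_iff.mp hpre' with h0 | ⟨t'', ht'', _⟩
          · simp at h0
          · have hbd : b = d := by injection ht''
            exact hm ⟨hac.symm, hbd.symm⟩
      · exact not_infix_of_rem_eq heq' hinf'

theorem reduceFix_chain (s : List Char) :
    PySem.Chars.replace (PySem.Chars.replace (PySem.Chars.replace
      (PySem.Chars.replace s ['(', ')'] []) ['[', ']'] []) ['{', '}'] []) ['<', '>'] []
    = rem '<' '>' (rem '{' '}' (rem '[' ']' (rem '(' ')' s))) := by
  simp only [replace_eq_rem]

theorem reduceFix_sublist : ∀ l : List Char, (reduceFix l).Sublist l := by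
  intro l
  induction l using reduceFix.induct with
  | case1 x t ht =>
    rw [reduceFix]

    rw [if_pos ht]
  | case2 x t hne ih =>
    rw [reduceFix]

    rw [if_neg hne]
    refine ih.trans ?_
    simp only [t, reduceFix_chain]
    exact ((rem_sublist _ _ _).trans ((rem_sublist _ _ _).trans
      ((rem_sublist _ _ _).trans (rem_sublist _ _ _))))

theorem reduceFix_ccGo : ∀ (l st : List Char), ccGo oasA st (reduceFix l) = ccGo oasA st l := by
  intro l
  induction l using reduceFix.induct with
  | case1 x t ht =>
    intro st
    rw [reduceFix]
    rw [if_pos ht]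
  | case2 x t hne ih =>
    intro st
    rw [reduceFix]
    rw [if_neg hne]
    rw [ih st]
    simp only [t, reduceFix_chain]
    rw [ccGo_rem '<' '>' (by decide), ccGo_rem '{' '}' (by decide),
        ccGo_rem '[' ']' (by decide), ccGo_rem '(' ')' (by decide)]

theorem reduceFix_irred : ∀ (l : List Char), ∀ p ∈ pats, ¬ ([p.1, p.2] <:+: reduceFix l) := by
  intro l
  induction l using reduceFix.induct with
  | case1 x t ht =>
    intro p hp
    rw [reduceFix]
    rw [if_pos ht]
    simp only [t, reduceFix_chain] at ht
    have h1 := (rem_sublist '(' ')' x).length_le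
    have h2 := (rem_sublist '[' ']' (rem '(' ')' x)).length_le
    have h3 := (rem_sublist '{' '}' (rem '[' ']' (rem '(' ')' x))).length_le
    have h4 := (rem_sublist '<' '>' (rem '{' '}' (rem '[' ']' (rem '(' ')' x)))).length_le
    have hlen : (rem '<' '>' (rem '{' '}' (rem '[' ']' (rem '(' ')' x)))).length = x.length := by
      rw [ht]
    have q1 : rem '(' ')' x = x := (rem_sublist _ _ _).eq_of_length (by omega)
    rw [q1] at h2 h3 h4 hlen ht
    have q2 : rem '[' ']' x = x := (rem_sublist _ _ _).eq_of_length (by omega)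
    rw [q2] at h3 h4 hlen ht
    have q3 : rem '{' '}' x = x := (rem_sublist _ _ _).eq_of_length (by omega)
    rw [q3] at h4 hlen ht
    simp only [pats, List.mem_cons, List.not_mem_nil, or_false] at hp
    rcases hp with rfl | rfl | rfl | rfl
    · exact not_infix_of_rem_eq q1
    · exact not_infix_of_rem_eq q2
    · exact not_infix_of_rem_eq q3
    · exact not_infix_of_rem_eq ht
  | case2 x t hne ih =>
    intro p hp
    rw [reduceFix]
    rw [if_neg hne]
    exact ih p hp

def aRowScore (row : List Char) : Int :=
  match corruptCloser oasA row with
  | (true, some c) => pointsA.getD c 0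
  | _ => 0

def bRowScore (row : List Char) : Int :=
  match (reduceFix (row.filter (fun ch => PySem.Chars.isIn [ch] bracketsB))).find?
      (fun ch => pointsB.contains ch) with
  | some ch => pointsB.getD ch 0
  | none => 0

theorem row_eq (row : List Char) : aRowScore row = bRowScore row := by
  have hf : corruptCloser oasA row =
      ccGo oasA [] (reduceFix (row.filter (fun ch => PySem.Chars.isIn [ch] bracketsB))) := by
    rw [corruptCloser, reduceFix_ccGo, ccGo_filter]
  have hall : ∀ c ∈ reduceFix (row.filter (fun ch => PySem.Chars.isIn [ch] bracketsB)), c ∈ bracketsB := by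
    intro c hc
    have hcf := (reduceFix_sublist _).subset hc
    have := (List.mem_filter.mp hcf).2
    rw [isIn_singleton] at this
    simpa using this
  rw [aRowScore, bRowScore, hf, scan_irred _ hall (reduceFix_irred _)]
  cases hfind : (reduceFix (row.filter (fun ch => PySem.Chars.isIn [ch] bracketsB))).find?
      (fun ch => pointsB.contains ch) with
  | none => rfl
  | some ch =>
    have hch : pointsB.contains ch = true := List.find?_some hfind
    rw [pointsB_contains] at hch
    simp at hch
    rcases hch with rfl | rfl | rfl | rfl <;> rfl

theorem a_fold : ∀ (rows : List (List Char)) (acc : List Char),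
    scoreInvalidClosers (rows.foldl (fun acc row =>
      match corruptCloser oasA row with
      | (true, some c) => acc ++ [c]
      | _ => acc) acc)
    = scoreInvalidClosers acc + (rows.map aRowScore).sum
  | [], acc => by simp
  | row :: rows, acc => by
    rw [List.foldl_cons, a_fold rows, List.map_cons, List.sum_cons]
    simp only [aRowScore]
    rcases hc : corruptCloser oasA row with ⟨_|_, _|c⟩ <;>
      simp [scoreInvalidClosers] <;> ring

theorem b_fold : ∀ (rows : List String) (total : Int),
    rows.foldl (fun total row =>
      let s := row.toList.filter (fun ch => PySem.Chars.isIn [ch] bracketsB)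
      let r := reduceFix s
      match r.find? (fun ch => pointsB.contains ch) with
      | some ch => total + pointsB.getD ch 0
      | none => total) total
    = total + (rows.map (fun row => bRowScore row.toList)).sum
  | [], total => by simp
  | row :: rows, total => by
    rw [List.foldl_cons, b_fold rows]
    rw [List.map_cons, List.sum_cons]
    simp only [bRowScore]
    cases hfind : (reduceFix (row.toList.filter (fun ch => PySem.Chars.isIn [ch] bracketsB))).find?
        (fun ch => pointsB.contains ch) <;> simp <;> ring


-- ===== VERDICT (by name: the statement is the Claim_ definition above) =====
theorem result_part1_spec : Claim_equal_result_part1 := by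
  intro input _
  show result_part1 input = result_part1_alt input
  simp only [result_part1, result_part1_alt]
  rw [a_fold, b_fold]
  rw [show scoreInvalidClosers [] = 0 from rfl]
  rw [List.map_map]
  rw [show (aRowScore ∘ fun row : String => row.toList) = (fun row : String => bRowScore row.toList)
    from funext (fun r => row_eq r.toList)]
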